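-- pv_equiv track=rewrite | github.com/N43527/neuralNetworkPoker | testing_utilities.py | arrayToHandConverter52
-- ===== SOURCE A (Python) =====
-- def arrayToHandConverter52(xArray):
--     myHand = []
--     communityHand = []
--     oppHand = []
--
--     reverseNumDict = {0:"A", 1: "2", 2: "3", 3: "4", 4: "5", 5: "6",
--            6: "7", 7: "8", 8: "9", 9: "T", 10: "J", 11: "Q", 12: "K"}
--
--     reverseSuitDict = {0: "s", 1: "h", 2: "c", 3: "d"}
--
--     for i in range(len(xArray)):
--         cardName = reverseNumDict[i%13]+reverseSuitDict[i//13]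
--         if xArray[i] == 3:
--             myHand.append(cardName)
--         elif xArray[i] == 2:
--             communityHand.append(cardName)
--         elif xArray[i] == 1:
--             oppHand.append(cardName)
--
--     return myHand, communityHand, oppHand
-- ===== SOURCE B (Python) =====
-- def arrayToHandConverter52(xArray):
--     reverseNumDict = {0:"A", 1: "2", 2: "3", 3: "4", 4: "5", 5: "6",
--            6: "7", 7: "8", 8: "9", 9: "T", 10: "J", 11: "Q", 12: "K"}
--     reverseSuitDict = {0: "s", 1: "h", 2: "c", 3: "d"}
--     names = [reverseNumDict[i % 13] + reverseSuitDict[i // 13] for i in range(len(xArray))]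
--     myHand = [names[i] for i in range(len(xArray)) if xArray[i] == 3]
--     communityHand = [names[i] for i in range(len(xArray)) if xArray[i] == 2]
--     oppHand = [names[i] for i in range(len(xArray)) if xArray[i] == 1]
--     return myHand, communityHand, oppHand
-- ===== Notes on version B (the rewrite author's own statement) =====
-- stated objective: alternative
-- what changed: Replaces the single dispatch loop with three accumulators by an eagerly built card-name table followed by three independent filtered comprehensions, one per hand.
import Mathlib
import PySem

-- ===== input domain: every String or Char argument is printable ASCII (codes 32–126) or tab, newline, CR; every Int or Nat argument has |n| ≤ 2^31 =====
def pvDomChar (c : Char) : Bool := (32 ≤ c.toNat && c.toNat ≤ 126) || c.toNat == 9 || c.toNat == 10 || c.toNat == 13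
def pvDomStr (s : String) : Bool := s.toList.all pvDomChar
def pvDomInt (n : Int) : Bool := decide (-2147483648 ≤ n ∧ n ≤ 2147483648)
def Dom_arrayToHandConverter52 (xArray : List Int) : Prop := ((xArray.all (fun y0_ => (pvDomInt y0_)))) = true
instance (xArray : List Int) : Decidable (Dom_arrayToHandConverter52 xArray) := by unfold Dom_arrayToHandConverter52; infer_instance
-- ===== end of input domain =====

-- B replaces A's single dispatch loop (three accumulators) by an eager card-name table
-- plus three independent filtered comprehensions; alternative decomposition, same cost.

-- shared dictionary literals of the Python source
def pvRevNum : PySem.Dict Int String :=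
  PySem.Dict.ofList [(0, "A"), (1, "2"), (2, "3"), (3, "4"), (4, "5"), (5, "6"),
    (6, "7"), (7, "8"), (8, "9"), (9, "T"), (10, "J"), (11, "Q"), (12, "K")]

def pvRevSuit : PySem.Dict Int String :=
  PySem.Dict.ofList [(0, "s"), (1, "h"), (2, "c"), (3, "d")]

-- cardName = reverseNumDict[i%13] + reverseSuitDict[i//13]  (total via getD; Pre_ keeps i//13 ≤ 3)
def pvCardName (i : Int) : String :=
  (pvRevNum.getD (PySem.Int.mod i 13) "") ++ (pvRevSuit.getD (PySem.Int.floordiv i 13) "")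

-- ===== PORT A =====
-- the loop body of A, as a named step function
def pvStep (xArray : List Int) (st : List String × List String × List String) (i : Int) :
    List String × List String × List String :=
  let cardName := pvCardName i
  let v := PySem.List.pyGetD xArray i 0
  if v == 3 then (st.1 ++ [cardName], st.2.1, st.2.2)
  else if v == 2 then (st.1, st.2.1 ++ [cardName], st.2.2)
  else if v == 1 then (st.1, st.2.1, st.2.2 ++ [cardName])
  else st

def arrayToHandConverter52 (xArray : List Int) : List String × List String × List String :=
  (PySem.List.pyRange 0 (xArray.length : Int) 1).foldl (pvStep xArray) ([], [], [])

-- ===== PORT B =====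
def arrayToHandConverter52_alt (xArray : List Int) : List String × List String × List String :=
  let names := (PySem.List.pyRange 0 (xArray.length : Int) 1).map pvCardName
  let myHand := ((PySem.List.pyRange 0 (xArray.length : Int) 1).filter
      (fun i => PySem.List.pyGetD xArray i 0 == 3)).map (fun i => PySem.List.pyGetD names i "")
  let communityHand := ((PySem.List.pyRange 0 (xArray.length : Int) 1).filter
      (fun i => PySem.List.pyGetD xArray i 0 == 2)).map (fun i => PySem.List.pyGetD names i "")
  let oppHand := ((PySem.List.pyRange 0 (xArray.length : Int) 1).filter
      (fun i => PySem.List.pyGetD xArray i 0 == 1)).map (fun i => PySem.List.pyGetD names i "")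
  (myHand, communityHand, oppHand)

-- ===== PRECONDITION & SPEC =====
-- Python A raises KeyError (reverseSuitDict[4]) as soon as len(xArray) > 52; Pre_ excludes exactly those inputs.
def Pre_arrayToHandConverter52 (xArray : List Int) : Prop := xArray.length ≤ 52

instance (xArray : List Int) : Decidable (Pre_arrayToHandConverter52 xArray) := by
  unfold Pre_arrayToHandConverter52; infer_instance

def pvWitness_arrayToHandConverter52 : List Int := [3, 0, 2, 1, 3, 0, 2]

def Spec_arrayToHandConverter52 (xArray : List Int) (out : List String × List String × List String) : Prop := out = arrayToHandConverter52_alt xArray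
instance (xArray : List Int) (out : List String × List String × List String) : Decidable (Spec_arrayToHandConverter52 xArray out) := by unfold Spec_arrayToHandConverter52; infer_instance

-- ===== CLAIM (what is proved, stated in full; the proofs are below) =====
def Claim_equal_arrayToHandConverter52 : Prop := ∀ (xArray : List Int), Dom_arrayToHandConverter52 xArray → Pre_arrayToHandConverter52 xArray → Spec_arrayToHandConverter52 xArray (arrayToHandConverter52 xArray)

-- ===== LEMMAS AND PROOFS =====

-- A's dispatch loop, over any index list, equals three filtered maps.
theorem pv_loop_eq (xArray : List Int) (l : List Int) (a b c : List String) :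
    l.foldl (pvStep xArray) (a, b, c)
    = (a ++ (l.filter (fun i => PySem.List.pyGetD xArray i 0 == 3)).map pvCardName,
       b ++ (l.filter (fun i => PySem.List.pyGetD xArray i 0 == 2)).map pvCardName,
       c ++ (l.filter (fun i => PySem.List.pyGetD xArray i 0 == 1)).map pvCardName) := by
  induction l generalizing a b c with
  | nil => simp
  | cons x xs ih =>
    by_cases h3 : PySem.List.pyGetD xArray x 0 = 3
    · have hs : pvStep xArray (a, b, c) x = (a ++ [pvCardName x], b, c) := by
        simp [pvStep, h3]
      rw [List.foldl_cons, hs, ih]; simp [h3]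
    · by_cases h2 : PySem.List.pyGetD xArray x 0 = 2
      · have hs : pvStep xArray (a, b, c) x = (a, b ++ [pvCardName x], c) := by
          simp [pvStep, h2]
        rw [List.foldl_cons, hs, ih]; simp [h2, h3]
      · by_cases h1 : PySem.List.pyGetD xArray x 0 = 1
        · have hs : pvStep xArray (a, b, c) x = (a, b, c ++ [pvCardName x]) := by
            simp [pvStep, h1, h2, h3]
          rw [List.foldl_cons, hs, ih]; simp [h1, h2, h3]
        · have hs : pvStep xArray (a, b, c) x = (a, b, c) := by
            simp [pvStep, h1, h2, h3]
          rw [List.foldl_cons, hs, ih]; simp [h1, h2, h3]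

-- indexing the eagerly built names table at an index of the range gives pvCardName
theorem pv_names_lookup (xArray : List Int) (p : Int → Bool) :
    ((PySem.List.pyRange 0 (xArray.length : Int) 1).filter p).map
        (fun i => PySem.List.pyGetD ((PySem.List.pyRange 0 (xArray.length : Int) 1).map pvCardName) i "")
      = ((PySem.List.pyRange 0 (xArray.length : Int) 1).filter p).map pvCardName := by
  apply List.map_congr_left
  intro i hi
  have hmem := List.mem_of_mem_filter hi
  rw [PySem.List.mem_pyRange_one] at hmem
  exact PySem.List.pyGetD_map_pyRange_of_nonneg pvCardName _ i "" hmem.1 hmem.2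

-- ===== VERDICT (by name: the statement is the Claim_ definition above) =====
theorem arrayToHandConverter52_spec : Claim_equal_arrayToHandConverter52 := by
  intro xArray _ _
  unfold Spec_arrayToHandConverter52 arrayToHandConverter52 arrayToHandConverter52_alt
  dsimp only
  rw [pv_names_lookup, pv_names_lookup, pv_names_lookup, pv_loop_eq]
  simp
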